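-- pv_equiv track=rewrite | github.com/zeciola/lexicographically-smallest-string | main.py | get_small_string
-- ===== SOURCE A (Python) =====
-- def get_small_string(s: str):
--     word = list(s)
--     for i in range(len(word)):
--         if word[i] != "a":
--             word[i] = chr(ord(word[i]) - 1)
--         else:
--             break
--
--     return "".join(word)
-- ===== SOURCE B (Python) =====
-- def get_small_string(s: str):
--     k = s.find("a")
--     if k == -1:
--         k = len(s)
--     return "".join(chr(ord(c) - 1) for c in s[:k]) + s[k:]
-- ===== Notes on version B (the rewrite author's own statement) =====
-- stated objective: idiomatic
-- what changed: Replaces the index loop that mutates a char list and breaks at the first 'a' by a find-then-map decomposition: locate the boundary with str.find, map the decrement over the prefix slice and append the untouched suffix.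
import Mathlib
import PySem

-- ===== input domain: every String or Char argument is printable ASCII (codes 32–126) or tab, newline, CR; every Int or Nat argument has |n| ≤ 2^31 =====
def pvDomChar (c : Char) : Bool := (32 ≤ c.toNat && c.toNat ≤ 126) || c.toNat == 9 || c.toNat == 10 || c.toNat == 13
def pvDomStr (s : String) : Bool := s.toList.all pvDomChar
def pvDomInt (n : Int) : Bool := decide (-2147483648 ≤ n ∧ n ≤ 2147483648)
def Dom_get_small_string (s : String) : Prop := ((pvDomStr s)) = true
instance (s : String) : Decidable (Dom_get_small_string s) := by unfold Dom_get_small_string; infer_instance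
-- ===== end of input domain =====

-- B replaces A's mutate-and-break index loop by a find-then-map decomposition (locate the
-- first 'a', decrement the prefix, keep the suffix verbatim); objective: idiomatic.

-- ===== PORT A =====
-- A's for-loop with break over word = list(s): the break means later elements are untouched,
-- so the loop is the structural recursion below over the same char list (same tests, same
-- per-char update chr(ord(c)-1) = Char.ofNat (c.toNat - 1)).
def get_small_string_loop : List Char → List Char
  | [] => []
  | c :: rest =>
      if c ≠ 'a' then Char.ofNat (c.toNat - 1) :: get_small_string_loop rest
      else c :: rest

def get_small_string (s : String) : String :=
  String.mk (get_small_string_loop s.toList)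

-- ===== PORT B =====
def get_small_string_alt (s : String) : String :=
  let f := PySem.Str.find s "a"
  let k : Int := if f = -1 then (PySem.Str.len s : Int) else f
  String.mk ((PySem.List.slice s.toList none (some k)).map (fun c => Char.ofNat (c.toNat - 1))
              ++ PySem.List.slice s.toList (some k) none)

-- ===== PRECONDITION & SPEC =====
def Spec_get_small_string (s : String) (out : String) : Prop := out = get_small_string_alt s
instance (s : String) (out : String) : Decidable (Spec_get_small_string s out) := by unfold Spec_get_small_string; infer_instance

-- ===== CLAIM (what is proved, stated in full; the proofs are below) =====
def Claim_equal_get_small_string : Prop := ∀ (s : String), Dom_get_small_string s → Spec_get_small_string s (get_small_string s)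

-- ===== LEMMAS AND PROOFS =====

-- index of the first 'a', or the length if there is none
def pvFirstA : List Char → Nat
  | [] => 0
  | c :: rest => if c = 'a' then 0 else pvFirstA rest + 1

lemma pvLoop_eq (cs : List Char) :
    get_small_string_loop cs =
      (cs.take (pvFirstA cs)).map (fun c => Char.ofNat (c.toNat - 1)) ++ cs.drop (pvFirstA cs) := by
  induction cs with
  | nil => simp [get_small_string_loop, pvFirstA]
  | cons c rest ih =>
      by_cases h : c = 'a'
      · simp [get_small_string_loop, pvFirstA, h]
      · simp [get_small_string_loop, pvFirstA, h, ih]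

lemma pvFirstA_of_not_mem (cs : List Char) (h : 'a' ∉ cs) : pvFirstA cs = cs.length := by
  induction cs with
  | nil => simp [pvFirstA]
  | cons c rest ih =>
      simp only [List.mem_cons, not_or] at h
      simp [pvFirstA, Ne.symm h.1, ih h.2]

lemma pvFind_go_a (cs : List Char) (k : Nat) :
    PySem.Chars.find.go ['a'] cs k =
      (if 'a' ∈ cs then ((k + pvFirstA cs : Nat) : Int) else -1) := by
  induction cs generalizing k with
  | nil => simp [PySem.Chars.find.go]
  | cons c rest ih =>
      by_cases h : c = 'a'
      · simp [PySem.Chars.find.go, List.isPrefixOf, h, pvFirstA]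
      · have hpre : List.isPrefixOf ['a'] (c :: rest) = false := by
          simp [List.isPrefixOf]; exact fun hc => (h hc.symm).elim
        simp only [PySem.Chars.find.go, hpre, if_false, Bool.false_eq_true]
        rw [ih]
        by_cases hm : 'a' ∈ rest
        · simp [hm, Ne.symm h, pvFirstA, h]; ring
        · simp [hm, Ne.symm h]

lemma pvFind_a (cs : List Char) :
    PySem.Chars.find cs ['a'] = (if 'a' ∈ cs then ((pvFirstA cs : Nat) : Int) else -1) := by
  have := pvFind_go_a cs 0
  simpa [PySem.Chars.find] using this

-- ===== VERDICT (by name: the statement is the Claim_ definition above) =====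
theorem get_small_string_spec : Claim_equal_get_small_string := by
  intro s _
  unfold Spec_get_small_string get_small_string get_small_string_alt
  have hfind : PySem.Str.find s "a" = PySem.Chars.find s.toList ['a'] := by
    simp [PySem.Str.find]
  rw [hfind, pvFind_a]
  by_cases hm : 'a' ∈ s.toList
  · have hne : ((pvFirstA s.toList : Nat) : Int) ≠ -1 := by omega
    simp only [hm, if_true, hne, if_false]
    rw [PySem.List.slice_to _ (by positivity), PySem.List.slice_from _ (by positivity)]
    simp [pvLoop_eq, Int.toNat_natCast]
  · have hlen : pvFirstA s.toList = s.toList.length := pvFirstA_of_not_mem _ hm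
    simp only [hm, if_false, if_true]
    have h0 : (0:Int) ≤ (PySem.Str.len s : Int) := Int.natCast_nonneg _
    rw [PySem.List.slice_to _ h0, PySem.List.slice_from _ h0]
    simp [pvLoop_eq, hlen, PySem.Str.len]
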